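-- pv_equiv track=rewrite | github.com/Staggier/Kattis | Python/heirsdilemma.py | different
-- ===== SOURCE A (Python) =====
-- def different(n):
--     d = {}
--     for c in str(n):
--         if d.get(c) is None:
--             d[c] = 1
--         else:
--             return False
--     return True
-- ===== SOURCE B (Python) =====
-- def different(n):
--     s = sorted(str(n))
--     return all(a < b for a, b in zip(s, s[1:]))
-- ===== Notes on version B (the rewrite author's own statement) =====
-- stated objective: alternative
-- what changed: Replaces A's scan with a dict of seen characters and early return by sorting str(n) and checking that every adjacent pair is strictly increasing (sort-then-adjacent-compare, no membership structure).
import Mathlib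
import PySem

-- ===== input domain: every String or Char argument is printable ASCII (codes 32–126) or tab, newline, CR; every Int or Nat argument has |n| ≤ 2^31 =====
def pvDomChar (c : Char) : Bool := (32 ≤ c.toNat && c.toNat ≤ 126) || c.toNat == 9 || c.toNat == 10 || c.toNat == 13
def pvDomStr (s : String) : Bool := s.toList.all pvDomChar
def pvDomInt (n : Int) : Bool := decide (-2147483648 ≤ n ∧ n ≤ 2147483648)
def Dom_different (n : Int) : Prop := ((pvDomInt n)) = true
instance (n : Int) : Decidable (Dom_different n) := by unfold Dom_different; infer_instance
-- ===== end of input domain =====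

-- B sorts str(n) and checks adjacent pairs are strictly increasing instead of A's dict scan with early return; objective: alternative.
-- ===== PORT A =====
-- the 'for c in str(n)' loop with the dict d and the early 'return False'
def differentLoop (cs : List Char) (d : PySem.Dict Char Int) : Bool :=
  match cs with
  | [] => true
  | c :: rest =>
    match d.get? c with
    | none => differentLoop rest (d.insert c 1)
    | some _ => false

def different (n : Int) : Bool :=
  differentLoop (PySem.Int.toStr n).toList PySem.Dict.empty

-- ===== PORT B =====
def different_alt (n : Int) : Bool :=
  let s := PySem.List.sorted (PySem.Int.toStr n).toList (fun c => c) false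
  (s.zip s.tail).all (fun p => decide (p.1 < p.2))

-- ===== PRECONDITION & SPEC =====
def Spec_different (n : Int) (out : Bool) : Prop := out = different_alt n
instance (n : Int) (out : Bool) : Decidable (Spec_different n out) := by unfold Spec_different; infer_instance

-- ===== CLAIM (what is proved, stated in full; the proofs are below) =====
def Claim_equal_different : Prop := ∀ (n : Int), Dom_different n → Spec_different n (different n)

-- ===== LEMMAS AND PROOFS =====

-- ===== VERDICT (by name: the statement is the Claim_ definition above) =====
-- the loop returns true iff the remaining chars are distinct and none is already a key of d
theorem differentLoop_eq (cs : List Char) (d : PySem.Dict Char Int) :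
    differentLoop cs d = decide (cs.Nodup ∧ ∀ c ∈ cs, d.get? c = none) := by
  induction cs generalizing d with
  | nil => simp [differentLoop]
  | cons c rest ih =>
    cases h : d.get? c with
    | some v => simp [differentLoop, h]
    | none =>
      simp only [differentLoop, h, ih]
      rw [decide_eq_decide]
      simp only [List.nodup_cons, List.mem_cons]
      constructor
      · rintro ⟨hn, hall⟩
        refine ⟨⟨?_, hn⟩, ?_⟩
        · intro hc
          have := hall c hc
          rw [PySem.Dict.get?_insert_self] at this
          simp at this
        · rintro x (rfl | hx)
          · exact h
          · have := hall x hx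
            by_cases hxc : x = c
            · subst hxc; exact h
            · rwa [PySem.Dict.get?_insert_of_ne _ _ hxc] at this
      · rintro ⟨⟨hc, hn⟩, hall⟩
        refine ⟨hn, ?_⟩
        intro x hx
        have hxc : x ≠ c := fun hh => hc (hh ▸ hx)
        rw [PySem.Dict.get?_insert_of_ne _ _ hxc]
        exact hall x (Or.inr hx)

-- zip-with-tail 'all strictly increasing' is IsChain (· < ·)
theorem zip_tail_all_lt (s : List Char) :
    ((s.zip s.tail).all (fun p => decide (p.1 < p.2))) = true ↔ s.IsChain (· < ·) := by
  induction s with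
  | nil => simp
  | cons a t ih =>
    cases t with
    | nil => simp
    | cons b u =>
      simp only [List.tail_cons] at ih
      simp only [List.tail_cons, List.zip_cons_cons, List.all_cons, Bool.and_eq_true, ih,
        List.isChain_cons_cons, decide_eq_true_iff]

theorem different_spec : Claim_equal_different := by
  intro n _
  unfold Spec_different different different_alt
  rw [differentLoop_eq, Bool.eq_iff_iff, decide_eq_true_iff, zip_tail_all_lt,
    List.isChain_iff_pairwise]
  set cs := (PySem.Int.toStr n).toList with hcs
  have hperm : (PySem.List.sorted cs (fun c => c) false).Perm cs :=
    PySem.List.sorted_perm _ _ _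
  have hle : (PySem.List.sorted cs (fun c => c) false).Pairwise (fun a b => a ≤ b) :=
    PySem.List.sorted_pairwise _ _
  constructor
  · rintro ⟨hn, -⟩
    have hn' : (PySem.List.sorted cs (fun c => c) false).Nodup := hperm.nodup_iff.mpr hn
    exact (hle.and hn').imp (fun {a b} ⟨h1, h2⟩ => lt_of_le_of_ne h1 h2)
  · intro hlt
    have hn' : (PySem.List.sorted cs (fun c => c) false).Nodup :=
      List.Pairwise.imp (fun h => ne_of_lt h) hlt
    exact ⟨hperm.nodup_iff.mp hn', by simp [PySem.Dict.get?_empty]⟩
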